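-- pv_equiv track=rewrite | github.com/CatherineG77/Algorithm2025_PJ1_DNA | DNA_.py | build_lcp_dp
-- ===== SOURCE A (Python) =====
-- def build_lcp_dp(query, m):
--     # 构造 dp 数组，其中 dp[i][j] 表示 query[i:] 与 query[j:] 的最长公共前缀长度。
--
--     n = len(query)
--     dp = [[0] * (n + 1) for _ in range(n + 1)]
--
--     maxEnd = 0
--
--     for i in range(n - 1, -1, -1):
--         if (i + m) > (n - 1):
--             maxEnd = n - 1
--         else:
--             maxEnd = i + m
--         for j in range(maxEnd, i, -1):
--             if query[i] == query[j]:
--                 dp[i][j] = dp[i + 1][j + 1] + 1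
--             else:
--                 dp[i][j] = 0
--     return dp
-- ===== SOURCE B (Python) =====
-- def build_lcp_dp(query, m):
--     # Diagonal sweep: for each offset d, one downward pass with a running
--     # match-length counter; no dp[i+1][j+1] matrix look-back.
--     n = len(query)
--     dp = [[0] * (n + 1) for _ in range(n + 1)]
--     dmax = min(m, n - 1)
--     for d in range(1, dmax + 1):
--         run = 0
--         for i in range(n - 1 - d, -1, -1):
--             run = run + 1 if query[i] == query[i + d] else 0
--             dp[i][i + d] = run
--     return dp
-- ===== Notes on version B (the rewrite author's own statement) =====
-- stated objective: alternative
-- what changed: Replaces the row-major fill that reads dp[i+1][j+1] from the matrix with a diagonal sweep per offset d that maintains a scalar running match-length counter, removing the matrix look-back entirely.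
import Mathlib
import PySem

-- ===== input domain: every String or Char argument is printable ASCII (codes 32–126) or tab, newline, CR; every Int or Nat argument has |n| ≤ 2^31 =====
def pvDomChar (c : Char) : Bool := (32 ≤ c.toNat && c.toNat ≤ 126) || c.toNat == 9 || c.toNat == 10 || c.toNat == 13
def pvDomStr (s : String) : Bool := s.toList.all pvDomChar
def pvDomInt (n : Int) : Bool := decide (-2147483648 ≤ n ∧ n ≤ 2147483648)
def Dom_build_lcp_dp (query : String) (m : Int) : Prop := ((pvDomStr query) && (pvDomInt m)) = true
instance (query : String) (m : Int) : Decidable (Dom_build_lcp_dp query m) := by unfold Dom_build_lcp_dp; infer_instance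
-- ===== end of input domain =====

-- B replaces A's row-major fill (which reads dp[i+1][j+1] back from the matrix) by a
-- per-diagonal sweep carrying a scalar running match-length counter: an alternative
-- decomposition of the same O(n*min(m,n)) work.

-- ===== PORT A =====
-- Python 'dp[i][j] = v' / 'dp[i][j]': both programs only use nonnegative in-range
-- indices (proved in the lemmas below), on which these helpers are exact.
def pvSet2 (dp : List (List Int)) (i j : Int) (v : Int) : List (List Int) :=
  dp.set i.toNat ((dp.getD i.toNat []).set j.toNat v)

def pvRead2 (dp : List (List Int)) (i j : Int) : Int :=
  PySem.List.pyGetD (PySem.List.pyGetD dp i []) j 0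

def build_lcp_dp (query : String) (m : Int) : List (List Int) :=
  let n : Int := PySem.Str.len query
  let dp : List (List Int) :=
    (PySem.List.pyRange 0 (n+1) 1).map (fun _ =>
      (PySem.List.pyRange 0 (n+1) 1).map (fun _ => (0 : Int)))
  (PySem.List.pyRange (n-1) (-1) (-1)).foldl (fun dp i =>
    let maxEnd : Int := if i + m > n - 1 then n - 1 else i + m
    (PySem.List.pyRange maxEnd i (-1)).foldl (fun dp j =>
      pvSet2 dp i j
        (if PySem.Str.pyGet? query i = PySem.Str.pyGet? query j
         then pvRead2 dp (i+1) (j+1) + 1 else 0)) dp) dp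

-- ===== PORT B =====
def build_lcp_dp_alt (query : String) (m : Int) : List (List Int) :=
  let n : Int := PySem.Str.len query
  let dp : List (List Int) :=
    (PySem.List.pyRange 0 (n+1) 1).map (fun _ =>
      (PySem.List.pyRange 0 (n+1) 1).map (fun _ => (0 : Int)))
  let dmax : Int := min m (n - 1)
  (PySem.List.pyRange 1 (dmax+1) 1).foldl (fun dp d =>
    ((PySem.List.pyRange (n-1-d) (-1) (-1)).foldl
      (fun (s : List (List Int) × Int) i =>
        let run : Int := if PySem.Str.pyGet? query i = PySem.Str.pyGet? query (i+d)
                         then s.2 + 1 else 0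
        (pvSet2 s.1 i (i+d) run, run)) (dp, 0)).1) dp

-- ===== PRECONDITION & SPEC =====
def Spec_build_lcp_dp (query : String) (m : Int) (out : List (List Int)) : Prop := out = build_lcp_dp_alt query m
instance (query : String) (m : Int) (out : List (List Int)) : Decidable (Spec_build_lcp_dp query m out) := by unfold Spec_build_lcp_dp; infer_instance

-- ===== CLAIM (what is proved, stated in full; the proofs are below) =====
def Claim_equal_build_lcp_dp : Prop := ∀ (query : String) (m : Int), Dom_build_lcp_dp query m → Spec_build_lcp_dp query m (build_lcp_dp query m)

-- ===== LEMMAS AND PROOFS =====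

-- common prefix length of two suffixes
def pvCpl : List Char → List Char → Nat
  | a :: as, b :: bs => if a = b then pvCpl as bs + 1 else 0
  | _, _ => 0

-- the value both programs leave in cell (a, b)
def pvG (cs : List Char) (m : Int) (a b : Nat) : Int :=
  if a < b ∧ (b : Int) ≤ (a : Int) + m ∧ b + 1 ≤ cs.length
  then (pvCpl (cs.drop a) (cs.drop b) : Int) else 0

def pvMat (N : Nat) (g : Nat → Nat → Int) : List (List Int) :=
  (List.range N).map (fun a => (List.range N).map (fun b => g a b))

-- intermediate-state cell functions
def pvGA (cs : List Char) (m : Int) (k : Nat) : Nat → Nat → Int :=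
  fun a b => if k ≤ a then pvG cs m a b else 0
def pvGRow (cs : List Char) (m : Int) (k : Nat) (j0 : Int) : Nat → Nat → Int :=
  fun a b => if (k + 1 ≤ a) ∨ (a = k ∧ j0 ≤ (b : Int)) then pvG cs m a b else 0
def pvGB (cs : List Char) (m : Int) (d : Nat) : Nat → Nat → Int :=
  fun a b => if b < a + d then pvG cs m a b else 0
def pvGD (cs : List Char) (m : Int) (d i0 : Nat) : Nat → Nat → Int :=
  fun a b => if b < a + d ∨ (b = a + d ∧ i0 ≤ a) then pvG cs m a b else 0

-- loop bodies of the two ports (definitionally equal to the lambdas in the ports)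
def pvStepCellA (query : String) (dp : List (List Int)) (i j : Int) : List (List Int) :=
  pvSet2 dp i j
    (if PySem.Str.pyGet? query i = PySem.Str.pyGet? query j
     then pvRead2 dp (i+1) (j+1) + 1 else 0)

def pvStepRowA (query : String) (m n : Int) (dp : List (List Int)) (i : Int) : List (List Int) :=
  let maxEnd : Int := if i + m > n - 1 then n - 1 else i + m
  (PySem.List.pyRange maxEnd i (-1)).foldl (fun dp j => pvStepCellA query dp i j) dp

def pvStepIB (query : String) (d : Int) (s : List (List Int) × Int) (i : Int) : List (List Int) × Int :=
  let run : Int := if PySem.Str.pyGet? query i = PySem.Str.pyGet? query (i+d)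
                   then s.2 + 1 else 0
  (pvSet2 s.1 i (i+d) run, run)

def pvStepDB (query : String) (n : Int) (dp : List (List Int)) (d : Int) : List (List Int) :=
  ((PySem.List.pyRange (n-1-d) (-1) (-1)).foldl (fun s i => pvStepIB query d s i) (dp, 0)).1

theorem pvCpl_nil (xs : List Char) : pvCpl xs [] = 0 := by cases xs <;> rfl

theorem pvCpl_step (cs : List Char) (a b : Nat) (ha : a < cs.length) (hb : b < cs.length) :
    pvCpl (cs.drop a) (cs.drop b)
      = if cs[a] = cs[b] then pvCpl (cs.drop (a+1)) (cs.drop (b+1)) + 1 else 0 := by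
  rw [List.drop_eq_getElem_cons ha, List.drop_eq_getElem_cons hb]
  rfl

theorem pvG_zero {cs : List Char} {m : Int} {a b : Nat}
    (h : ¬ (a < b ∧ (b : Int) ≤ (a : Int) + m ∧ b + 1 ≤ cs.length)) : pvG cs m a b = 0 :=
  if_neg h

theorem pvG_succ (cs : List Char) (m : Int) (a b : Nat)
    (hab : a < b) (hbm : (b : Int) ≤ (a : Int) + m) (hbn : b + 1 ≤ cs.length) :
    pvG cs m (a+1) (b+1) = (pvCpl (cs.drop (a+1)) (cs.drop (b+1)) : Int) := by
  by_cases h : b + 2 ≤ cs.length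
  · unfold pvG
    rw [if_pos ⟨by omega, by push_cast; omega, by omega⟩]
  · have hd : cs.drop (b+1) = [] := by
      apply List.drop_eq_nil_of_le; omega
    rw [pvG_zero (by omega), hd, pvCpl_nil]
    simp

theorem pvMat_congr {N : Nat} {g g' : Nat → Nat → Int}
    (h : ∀ a b, a < N → b < N → g a b = g' a b) : pvMat N g = pvMat N g' := by
  unfold pvMat
  apply List.map_congr_left
  intro a ha
  rw [List.mem_range] at ha
  apply List.map_congr_left
  intro b hb
  rw [List.mem_range] at hb
  exact h a b ha hb

theorem pvGetD_map_range {α : Type} (N : Nat) (f : Nat → α) (d : α) (a : Nat) (ha : a < N) :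
    ((List.range N).map f).getD a d = f a := by
  rw [List.getD_eq_getElem?_getD, List.getElem?_map, List.getElem?_range ha]
  rfl

theorem pvRead2_pvMat {N : Nat} {g : Nat → Nat → Int} (a b : Nat) (ha : a < N) (hb : b < N) :
    pvRead2 (pvMat N g) (a : Int) (b : Int) = g a b := by
  unfold pvRead2 pvMat
  rw [PySem.List.pyGetD_natCast, PySem.List.pyGetD_natCast]
  rw [pvGetD_map_range N _ [] a ha, pvGetD_map_range N _ 0 b hb]

theorem pvSet_map_range {α : Type} (N : Nat) (f : Nat → α) (k : Nat) (v : α) :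
    ((List.range N).map f).set k v
      = (List.range N).map (fun x => if x = k then v else f x) := by
  apply List.ext_getElem
  · simp
  · intro i h1 h2
    simp only [List.length_set, List.length_map, List.length_range] at h1
    simp only [List.getElem_set, List.getElem_map, List.getElem_range]
    split_ifs with h3 h4 h4 <;> first | rfl | omega

theorem pvSet2_pvMat {N : Nat} {g : Nat → Nat → Int} (a b : Nat) (ha : a < N) (hb : b < N)
    (v : Int) :
    pvSet2 (pvMat N g) (a : Int) (b : Int) v
      = pvMat N (fun x y => if x = a ∧ y = b then v else g x y) := by
  unfold pvSet2 pvMat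
  simp only [Int.toNat_natCast]
  rw [pvGetD_map_range N _ [] a ha, pvSet_map_range, pvSet_map_range]
  apply List.map_congr_left
  intro x hx
  rw [List.mem_range] at hx
  by_cases hxa : x = a
  · subst hxa
    rw [if_pos rfl]
    apply List.map_congr_left
    intro y hy
    by_cases hyb : y = b
    · subst hyb; rw [if_pos rfl, if_pos ⟨rfl, rfl⟩]
    · rw [if_neg hyb, if_neg (by tauto)]
  · rw [if_neg hxa]
    apply List.map_congr_left
    intro y hy
    rw [if_neg (by tauto)]

theorem pvStrGet (query : String) (k : Nat) (hk : k < query.toList.length) :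
    PySem.Str.pyGet? query (k : Int) = some (query.toList[k]'hk) := by
  rw [PySem.Str.pyGet?_natCast]
  exact List.getElem?_eq_getElem hk

-- ===== A-side loop lemmas =====

theorem pvA_cell (query : String) (m : Int) (k j : Nat)
    (hkj : k < j) (hjm : (j : Int) ≤ (k : Int) + m) (hjn : j + 1 ≤ query.toList.length) :
    pvStepCellA query
        (pvMat (query.toList.length+1) (pvGRow query.toList m k ((j : Int)+1)))
        (k : Int) (j : Int)
      = pvMat (query.toList.length+1) (pvGRow query.toList m k (j : Int)) := by
  unfold pvStepCellA
  have hk : k < query.toList.length := by omega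
  have hj : j < query.toList.length := by omega
  rw [pvStrGet query k hk, pvStrGet query j hj]
  have hread : pvRead2 (pvMat (query.toList.length+1)
      (pvGRow query.toList m k ((j:Int)+1))) ((k:Int)+1) ((j:Int)+1)
      = (pvCpl (query.toList.drop (k+1)) (query.toList.drop (j+1)) : Int) := by
    have h1 : ((k:Int)+1) = ((k+1 : Nat) : Int) := by push_cast; ring
    have h2 : ((j:Int)+1) = ((j+1 : Nat) : Int) := by push_cast; ring
    rw [h1, h2, pvRead2_pvMat (k+1) (j+1) (by omega) (by omega)]
    unfold pvGRow
    rw [if_pos (Or.inl (by omega))]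
    exact pvG_succ query.toList m k j hkj hjm hjn
  rw [hread]
  have hcond : k < j ∧ (j : Int) ≤ (k : Int) + m ∧ j + 1 ≤ query.toList.length :=
    ⟨hkj, hjm, hjn⟩
  have hv : (if some (query.toList[k]'hk) = some (query.toList[j]'hj)
        then (pvCpl (query.toList.drop (k+1)) (query.toList.drop (j+1)) : Int) + 1 else 0)
      = pvG query.toList m k j := by
    unfold pvG
    rw [if_pos hcond, pvCpl_step query.toList k j hk hj]
    by_cases he : query.toList[k]'hk = query.toList[j]'hj
    · simp only [he, if_true]
      push_cast; ring
    · simp [he]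
  rw [hv, pvSet2_pvMat k j (by omega) (by omega)]
  apply pvMat_congr
  intro a b _ _
  unfold pvGRow
  split_ifs <;> first | rfl | omega | simp_all

theorem pvA_inner (query : String) (m : Int) (k : Nat) (maxEnd : Int)
    (hme : maxEnd ≤ (k : Int) + m) (hmn : maxEnd ≤ (query.toList.length : Int) - 1) :
    ∀ t : Nat, (k : Int) + t ≤ maxEnd →
      (PySem.List.pyRange ((k : Int) + t) (k : Int) (-1)).foldl
          (fun dp j => pvStepCellA query dp (k : Int) j)
          (pvMat (query.toList.length+1) (pvGRow query.toList m k ((k : Int) + t + 1)))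
        = pvMat (query.toList.length+1) (pvGRow query.toList m k ((k : Int) + 1)) := by
  intro t
  induction t with
  | zero =>
    intro _
    rw [PySem.List.pyRange_neg_one_eq_nil (by omega)]
    simp
  | succ t ih =>
    intro ht
    rw [PySem.List.pyRange_neg_one_cons (by push_cast; omega)]
    rw [List.foldl_cons]
    have hj : ((k : Int) + (t+1 : Nat)) = ((k + t + 1 : Nat) : Int) := by push_cast; ring
    have hstep :
        pvStepCellA query
            (pvMat (query.toList.length+1) (pvGRow query.toList m k ((k:Int) + (t+1:Nat) + 1)))
            (k : Int) ((k : Int) + (t+1 : Nat))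
          = pvMat (query.toList.length+1) (pvGRow query.toList m k ((k:Int) + (t+1:Nat))) := by
      rw [hj]
      have := pvA_cell query m k (k+t+1) (by omega)
        (by push_cast at ht ⊢; omega) (by push_cast at ht hmn ⊢; omega)
      convert this using 3
    rw [show ((k:Int) + (t+1:Nat) - 1) = (k:Int) + t by push_cast; ring]
    rw [hstep, show ((k:Int) + (t+1:Nat)) = (k:Int) + t + 1 by push_cast; ring]
    exact ih (by push_cast at ht ⊢; omega)

theorem pvA_rowAux (query : String) (m : Int) (k : Nat) (hk : k + 1 ≤ query.toList.length)
    (maxEnd : Int)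
    (hme0 : maxEnd = min ((k : Int) + m) ((query.toList.length : Int) - 1)) :
    (PySem.List.pyRange maxEnd (k : Int) (-1)).foldl
        (fun dp j => pvStepCellA query dp (k : Int) j)
        (pvMat (query.toList.length+1) (pvGA query.toList m (k+1)))
      = pvMat (query.toList.length+1) (pvGA query.toList m k) := by
  have hme1 : maxEnd ≤ (k : Int) + m := by omega
  have hme2 : maxEnd ≤ (query.toList.length : Int) - 1 := by omega
  by_cases h : maxEnd ≤ (k : Int)
  · rw [PySem.List.pyRange_neg_one_eq_nil h, List.foldl_nil]
    apply pvMat_congr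
    intro a b ha hb
    unfold pvGA
    split_ifs <;>
      first
        | rfl | omega
        | (exact (pvG_zero (by omega)).symm)
  · replace h : (k : Int) < maxEnd := by omega
    set t : Nat := (maxEnd - (k:Int)).toNat with htd
    have ht : (k:Int) + t = maxEnd := by rw [htd]; omega
    have hinit : pvMat (query.toList.length+1) (pvGA query.toList m (k+1))
        = pvMat (query.toList.length+1) (pvGRow query.toList m k ((k:Int) + t + 1)) := by
      apply pvMat_congr
      intro a b ha hb
      unfold pvGA pvGRow
      split_ifs <;>
        first
          | rfl | omega
          | (exact (pvG_zero (by omega)).symm)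
    rw [← ht, hinit]
    rw [pvA_inner query m k maxEnd hme1 hme2 t (by omega)]
    apply pvMat_congr
    intro a b ha hb
    unfold pvGRow pvGA
    split_ifs <;>
      first
        | rfl | omega
        | (exact pvG_zero (by omega)) | (exact (pvG_zero (by omega)).symm)

theorem pvA_row (query : String) (m : Int) (k : Nat) (hk : k + 1 ≤ query.toList.length) :
    pvStepRowA query m (query.toList.length : Int)
        (pvMat (query.toList.length+1) (pvGA query.toList m (k+1))) (k : Int)
      = pvMat (query.toList.length+1) (pvGA query.toList m k) := by
  unfold pvStepRowA
  exact pvA_rowAux query m k hk _ (by split_ifs <;> omega)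

theorem pvA_outerLoop (query : String) (m : Int) :
    ∀ k : Nat, k ≤ query.toList.length →
      (PySem.List.pyRange ((k : Int) - 1) (-1) (-1)).foldl
          (pvStepRowA query m (query.toList.length : Int))
          (pvMat (query.toList.length+1) (pvGA query.toList m k))
        = pvMat (query.toList.length+1) (pvGA query.toList m 0) := by
  intro k
  induction k with
  | zero =>
    intro _
    rw [PySem.List.pyRange_neg_one_eq_nil (by norm_num)]
    simp
  | succ k ih =>
    intro hk
    rw [PySem.List.pyRange_neg_one_cons (by push_cast; omega), List.foldl_cons]
    have h1 : ((k+1 : Nat) : Int) - 1 = (k : Int) := by push_cast; ring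
    rw [h1, pvA_row query m k hk]
    exact ih (by omega)

-- ===== B-side loop lemmas =====

theorem pvB_i (query : String) (m : Int) (d : Nat)
    (hd1 : 1 ≤ d) (hdm : (d : Int) ≤ m) (hdn : d + 1 ≤ query.toList.length) :
    ∀ k : Nat, k ≤ query.toList.length - d →
      (PySem.List.pyRange ((k : Int) - 1) (-1) (-1)).foldl
          (fun s i => pvStepIB query (d : Int) s i)
          (pvMat (query.toList.length+1) (pvGD query.toList m d k),
           (pvCpl (query.toList.drop k) (query.toList.drop (k+d)) : Int))
        = (pvMat (query.toList.length+1) (pvGD query.toList m d 0),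
           (pvCpl (query.toList.drop 0) (query.toList.drop (0+d)) : Int)) := by
  intro k
  induction k with
  | zero =>
    intro _
    rw [PySem.List.pyRange_neg_one_eq_nil (by norm_num)]
    simp
  | succ k ih =>
    intro hk
    rw [PySem.List.pyRange_neg_one_cons (by push_cast; omega), List.foldl_cons]
    have h1 : ((k+1 : Nat) : Int) - 1 = (k : Int) := by push_cast; ring
    rw [h1]
    set nn := query.toList.length with hnn
    have hkn : k < nn := by omega
    have hkdn : k + d < nn := by omega
    have hstep : pvStepIB query (d : Int)
        (pvMat (nn+1) (pvGD query.toList m d (k+1)),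
         (pvCpl (query.toList.drop (k+1)) (query.toList.drop (k+1+d)) : Int)) (k : Int)
        = (pvMat (nn+1) (pvGD query.toList m d k),
           (pvCpl (query.toList.drop k) (query.toList.drop (k+d)) : Int)) := by
      simp only [pvStepIB]
      have hid : (k : Int) + (d : Int) = ((k + d : Nat) : Int) := by push_cast; ring
      rw [hid, pvStrGet query k hkn, pvStrGet query (k+d) hkdn]
      have hrun : (if some (query.toList[k]'hkn) = some (query.toList[k+d]'hkdn)
            then (pvCpl (query.toList.drop (k+1)) (query.toList.drop (k+1+d)) : Int) + 1 else 0)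
          = (pvCpl (query.toList.drop k) (query.toList.drop (k+d)) : Int) := by
        rw [pvCpl_step query.toList k (k+d) hkn hkdn]
        by_cases he : query.toList[k]'hkn = query.toList[k+d]'hkdn
        · rw [if_pos (by rw [he]), if_pos he]
          rw [show k+1+d = k+d+1 by omega]
          push_cast; ring
        · rw [if_neg (by simpa using he), if_neg he]; rfl
      rw [hrun]
      have hset : pvSet2 (pvMat (nn+1) (pvGD query.toList m d (k+1))) (k : Int)
            ((k + d : Nat) : Int)
            ((pvCpl (query.toList.drop k) (query.toList.drop (k+d)) : Int))
          = pvMat (nn+1) (pvGD query.toList m d k) := by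
        have hgv : pvG query.toList m k (k+d)
            = (pvCpl (query.toList.drop k) (query.toList.drop (k+d)) : Int) := by
          have hcond : k < k + d ∧ ((k + d : Nat) : Int) ≤ (k : Int) + m ∧
              k + d + 1 ≤ query.toList.length :=
            ⟨by omega, by push_cast; omega, by rw [← hnn]; omega⟩
          unfold pvG
          rw [if_pos hcond]
        rw [pvSet2_pvMat k (k+d) (by omega) (by omega)]
        apply pvMat_congr
        intro a b ha hb
        unfold pvGD
        split_ifs <;>
          first
            | rfl | omega
            | (exact hgv.symm)
            | simp_all
      rw [hset]
    rw [hstep]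
    exact ih (by omega)

theorem pvB_diag (query : String) (m : Int) (d : Nat)
    (hd1 : 1 ≤ d) (hdm : (d : Int) ≤ m) (hdn : d + 1 ≤ query.toList.length) :
    pvStepDB query (query.toList.length : Int)
        (pvMat (query.toList.length+1) (pvGB query.toList m d)) (d : Int)
      = pvMat (query.toList.length+1) (pvGB query.toList m (d+1)) := by
  unfold pvStepDB
  set nn := query.toList.length with hnn
  have h1 : (nn : Int) - 1 - (d : Int) = ((nn - d : Nat) : Int) - 1 := by
    have : d ≤ nn := by omega
    push_cast [this]; ring
  have hinit : (pvMat (nn+1) (pvGB query.toList m d), (0 : Int))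
      = (pvMat (nn+1) (pvGD query.toList m d (nn - d)),
         (pvCpl (query.toList.drop (nn - d)) (query.toList.drop ((nn - d) + d)) : Int)) := by
    have hdrop : query.toList.drop ((nn - d) + d) = [] := by
      apply List.drop_eq_nil_of_le
      rw [← hnn]; omega
    rw [hdrop, pvCpl_nil]
    refine Prod.ext ?_ (by simp)
    have hnd : d ≤ nn := by omega
    apply pvMat_congr
    intro a b ha hb
    unfold pvGB pvGD
    split_ifs <;>
      first
        | rfl | omega
        | (refine (pvG_zero ?_).symm; rw [← hnn]; omega)
  rw [h1, hinit, pvB_i query m d hd1 hdm hdn (nn - d) (le_refl _)]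
  apply pvMat_congr
  intro a b ha hb
  unfold pvGD pvGB
  split_ifs <;> first | rfl | omega

theorem pvB_outerLoop (query : String) (m : Int) (D : Nat)
    (hD : (D : Int) = min m ((query.toList.length : Int) - 1)) :
    ∀ c : Nat, c ≤ D →
      (PySem.List.pyRange ((D : Int) - (c : Int) + 1) ((D : Int) + 1) 1).foldl
          (pvStepDB query (query.toList.length : Int))
          (pvMat (query.toList.length+1) (pvGB query.toList m (D - c + 1)))
        = pvMat (query.toList.length+1) (pvGB query.toList m (D+1)) := by
  intro c
  induction c with
  | zero =>
    intro _
    rw [show (D : Int) - (0:Nat) + 1 = (D : Int) + 1 by push_cast; ring]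
    rw [PySem.List.pyRange_one_eq_nil (by omega)]
    simp
  | succ c ih =>
    intro hc
    have hdN : D - (c+1) + 1 = D - c := by omega
    rw [show (D : Int) - ((c+1:Nat) : Int) + 1 = (D : Int) - (c : Int) by push_cast; ring]
    rw [PySem.List.pyRange_one_cons (by omega), List.foldl_cons, hdN]
    have hd : (D : Int) - (c : Int) = ((D - c : Nat) : Int) := by
      have : c ≤ D := by omega
      push_cast [this]; ring
    have hmn : (D : Int) ≤ m ∧ (D : Int) ≤ (query.toList.length : Int) - 1 := by
      constructor <;> omega
    rw [hd, pvB_diag query m (D - c) (by omega) (by rw [← hd]; omega)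
      (by have h2 := hmn.2; omega)]
    have h3 : (D : Int) - (c : Int) + 1 = (D : Int) - (c : Int) + 1 := rfl
    rw [show ((D - c : Nat) : Int) + 1 = (D : Int) - (c : Int) + 1 by rw [hd]]
    rw [show D - c + 1 = D - c + 1 from rfl]
    exact ih (by omega)

-- ===== assembling the two sides =====

theorem pvZeroMat (n : Nat) :
    (PySem.List.pyRange 0 ((n : Int)+1) 1).map (fun _ =>
      (PySem.List.pyRange 0 ((n : Int)+1) 1).map (fun _ => (0 : Int)))
      = pvMat (n+1) (fun _ _ => 0) := by
  have h : ((n : Int)+1) = ((n+1 : Nat) : Int) := by push_cast; ring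
  rw [h, PySem.List.pyRange_zero_natCast]
  unfold pvMat
  simp [Function.comp_def]

theorem pvhA (query : String) (m : Int) :
    build_lcp_dp query m
      = pvMat (query.toList.length+1) (fun a b => pvG query.toList m a b) := by
  have hlen : PySem.Str.len query = ((query.toList.length : Nat) : Int) := by simp
  show (PySem.List.pyRange ((PySem.Str.len query)-1) (-1) (-1)).foldl
        (pvStepRowA query m (PySem.Str.len query))
        ((PySem.List.pyRange 0 ((PySem.Str.len query)+1) 1).map (fun _ =>
          (PySem.List.pyRange 0 ((PySem.Str.len query)+1) 1).map (fun _ => (0 : Int))))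
      = _
  rw [hlen, pvZeroMat]
  have hinit : pvMat (query.toList.length+1) (fun _ _ => (0:Int))
      = pvMat (query.toList.length+1) (pvGA query.toList m query.toList.length) := by
    apply pvMat_congr
    intro a b ha hb
    unfold pvGA
    split_ifs <;>
      first | rfl | (exact (pvG_zero (by omega)).symm)
  rw [hinit, pvA_outerLoop query m query.toList.length (le_refl _)]
  apply pvMat_congr
  intro a b _ _
  unfold pvGA
  rw [if_pos (Nat.zero_le a)]


theorem pvhB (query : String) (m : Int) :
    build_lcp_dp_alt query m
      = pvMat (query.toList.length+1) (fun a b => pvG query.toList m a b) := by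
  have hlen : PySem.Str.len query = ((query.toList.length : Nat) : Int) := by simp
  show (PySem.List.pyRange 1 ((min m ((PySem.Str.len query) - 1))+1) 1).foldl
        (pvStepDB query (PySem.Str.len query))
        ((PySem.List.pyRange 0 ((PySem.Str.len query)+1) 1).map (fun _ =>
          (PySem.List.pyRange 0 ((PySem.Str.len query)+1) 1).map (fun _ => (0 : Int))))
      = _
  rw [hlen, pvZeroMat]
  set nn := query.toList.length with hnn
  set dmax : Int := min m ((nn : Int) - 1) with hdmax
  by_cases h : dmax ≤ 0
  · rw [PySem.List.pyRange_one_eq_nil (by omega), List.foldl_nil]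
    apply pvMat_congr
    intro a b ha hb
    refine (pvG_zero ?_).symm
    rw [← hnn]
    intro hcon
    have : (1:Int) ≤ dmax := by rw [hdmax]; omega
    omega
  · replace h : 0 < dmax := by omega
    set D : Nat := dmax.toNat with hDd
    have hD : (D : Int) = dmax := by rw [hDd]; omega
    have hinit : pvMat (nn+1) (fun _ _ => (0:Int))
        = pvMat (nn+1) (pvGB query.toList m (D - D + 1)) := by
      apply pvMat_congr
      intro a b ha hb
      unfold pvGB
      split_ifs <;> first | rfl | (exact (pvG_zero (by omega)).symm)
    have hlist : PySem.List.pyRange 1 (dmax+1) 1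
        = PySem.List.pyRange ((D : Int) - (D : Int) + 1) ((D : Int) + 1) 1 := by
      rw [hD]; norm_num
    rw [hlist, hinit,
        pvB_outerLoop query m D (by rw [hD, hdmax, hnn]) D (le_refl _)]
    have hband : ∀ a b : Nat, ¬ b < a + (D+1) → pvG query.toList m a b = 0 := by
      intro a b hc
      refine pvG_zero ?_
      rw [← hnn]
      intro hcon
      have h3 : (b : Int) - (a : Int) ≤ dmax := by rw [hdmax]; omega
      omega
    apply pvMat_congr
    intro a b ha hb
    unfold pvGB
    split_ifs with hc <;> first | rfl | (exact (hband a b hc).symm)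

-- ===== VERDICT (by name: the statement is the Claim_ definition above) =====
theorem build_lcp_dp_spec : Claim_equal_build_lcp_dp := by
  intro query m _
  unfold Spec_build_lcp_dp
  rw [pvhA query m, pvhB query m]
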